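-- pv_equiv track=rewrite | github.com/jimflores5/instant_nerdle_class_project | main.py | parse_raw_data
-- ===== SOURCE A (Python) =====
-- def parse_raw_data(entry):
--     # This function takes the 8 characters from the puzzle input and separates
--     # them into a list of the operators (+-*/=) and a list of single digits.
--     ops = []
--     nums = []
--     for char in entry:
--         if char in '+-*/=':
--             ops.append(char)
--         else:
--             nums.append(char)
--     ops.sort()  # .sort() places '=' after '+-*/'. (NICE!)
--     nums.sort() # There's no need to sort the digits, but I like to put them in order anyway.
--     return ops.copy(), nums.copy()
-- ===== SOURCE B (Python) =====
-- def parse_raw_data(entry):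
--     # Counting sort over character codes: tally every character once into a
--     # dict, then walk the code range min(ord)..max(ord) in increasing order,
--     # emitting each character count-many times into the operator or digit list.
--     # No comparison sort is performed at all.
--     if not entry:
--         return [], []
--     counts = {}
--     for ch in entry:
--         counts[ch] = counts.get(ch, 0) + 1
--     lo, hi = min(map(ord, entry)), max(map(ord, entry))
--     ops, nums = [], []
--     for code in range(lo, hi + 1):
--         c = chr(code)
--         k = counts.get(c, 0)
--         if c in '+-*/=':
--             ops.extend([c] * k)
--         else:
--             nums.extend([c] * k)
--     return ops, nums
-- ===== Notes on version B (the rewrite author's own statement) =====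
-- stated objective: alternative
-- what changed: A partitions the characters and comparison-sorts each part; B performs a counting sort: it tallies characters into a dict in one pass, then walks the ord-code range min..max in increasing order emitting each character count-many times into the operator or digit list, so no comparison sort is run at all.
import Mathlib
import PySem

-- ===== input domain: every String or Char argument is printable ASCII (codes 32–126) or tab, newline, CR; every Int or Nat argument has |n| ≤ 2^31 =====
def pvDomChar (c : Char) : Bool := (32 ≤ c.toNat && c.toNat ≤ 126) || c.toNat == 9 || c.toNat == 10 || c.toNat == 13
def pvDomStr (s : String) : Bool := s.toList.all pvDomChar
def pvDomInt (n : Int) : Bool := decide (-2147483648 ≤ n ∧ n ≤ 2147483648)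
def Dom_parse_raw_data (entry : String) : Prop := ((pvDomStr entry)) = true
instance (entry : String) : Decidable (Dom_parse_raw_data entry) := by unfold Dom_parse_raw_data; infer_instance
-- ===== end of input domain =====

-- B replaces A's partition-then-comparison-sort with a counting sort over character codes (tally once, then emit in code order); alternative algorithm, not claimed faster.

-- shared helper: the test `c in '+-*/='` (c a single character) is membership of that character
def pvIsOp (c : Char) : Bool := c ∈ (['+', '-', '*', '/', '='] : List Char)

-- ===== PORT A =====
-- partition loop (append the one-char string to ops / nums), then sort each list
def parse_raw_data (entry : String) : List String × List String :=
  let r := entry.toList.foldl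
    (fun (acc : List String × List String) c =>
      if pvIsOp c then (acc.1 ++ [String.ofList [c]], acc.2) else (acc.1, acc.2 ++ [String.ofList [c]]))
    ([], [])
  (PySem.List.sorted r.1 (fun x => x) false, PySem.List.sorted r.2 (fun x => x) false)

-- ===== PORT B =====
-- counting sort: counts[ch] += 1 in one pass, then for code in range(lo, hi+1)
-- emit chr(code) count-many times.  `chr(code)` is ported as `Char.ofNat code.toNat`,
-- exact for every valid codepoint; every code this port looks up lies between the
-- minimum and maximum code of `entry`'s own characters.
def parse_raw_data_alt (entry : String) : List String × List String :=
  if entry.toList.isEmpty then ([], [])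
  else
    let chars := entry.toList
    let counts : PySem.Dict Char Int :=
      chars.foldl (fun d ch => d.insert ch (d.getD ch 0 + 1)) PySem.Dict.empty
    let ords := chars.map (fun ch => (ch.toNat : Int))
    match PySem.List.min? ords (fun x => x), PySem.List.max? ords (fun x => x) with
    | some lo, some hi =>
        (PySem.List.pyRange lo (hi + 1) 1).foldl
          (fun (acc : List String × List String) code =>
            let c := Char.ofNat code.toNat
            let k := counts.getD c 0
            if pvIsOp c then (acc.1 ++ PySem.List.pyRepeat [String.ofList [c]] k, acc.2)
            else (acc.1, acc.2 ++ PySem.List.pyRepeat [String.ofList [c]] k))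
          ([], [])
    | _, _ => ([], [])   -- unreachable: chars is nonempty here

-- ===== PRECONDITION & SPEC =====
def Spec_parse_raw_data (entry : String) (out : List String × List String) : Prop := out = parse_raw_data_alt entry
instance (entry : String) (out : List String × List String) : Decidable (Spec_parse_raw_data entry out) := by unfold Spec_parse_raw_data; infer_instance

-- ===== CLAIM =====
def Claim_equal_parse_raw_data : Prop := ∀ (entry : String), Dom_parse_raw_data entry → Spec_parse_raw_data entry (parse_raw_data entry)

-- ===== LEMMAS AND PROOFS =====

theorem pv_sg_toList (a : Char) : (String.ofList [a]).toList = [a] :=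
  Eq.symm (String.ofList_eq.mp rfl)

theorem pv_sg_lt (a b : Char) : String.ofList [a] < String.ofList [b] ↔ a < b := by
  simp only [String.lt_iff_toList_lt, pv_sg_toList]
  constructor
  · intro h
    cases h with
    | rel h => exact h
    | cons h => cases h
  · intro h; exact List.Lex.rel h

theorem pv_sg_le (a b : Char) : String.ofList [a] ≤ String.ofList [b] ↔ a ≤ b := by
  rw [← not_lt, ← not_lt, pv_sg_lt]

theorem pv_chr_toNat (n : Nat) (h : n < 55296) : (Char.ofNat n).toNat = n := by
  have hv : Nat.isValidChar n := Or.inl h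
  simp [Char.ofNat, hv, Char.toNat, Char.ofNatAux]

-- a loop routing an extension to one of two accumulators is two filtered flatMaps
theorem pv_foldl_route {α : Type} (l : List α) (p : α → Bool) (f : α → List String)
    (a b : List String) :
    l.foldl (fun (acc : List String × List String) x =>
        if p x then (acc.1 ++ f x, acc.2) else (acc.1, acc.2 ++ f x)) (a, b)
    = (a ++ (l.filter p).flatMap f, b ++ (l.filter (fun x => !p x)).flatMap f) := by
  induction l generalizing a b with
  | nil => simp
  | cons x t ih =>
      simp only [List.foldl_cons, List.filter_cons]
      by_cases h : p x <;> simp [h, ih]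

-- a filtered flatMap whose function is empty off the filter is the full flatMap
theorem pv_flatMap_filter {α β : Type} (l : List α) (p : α → Bool) (f : α → List β)
    (h : ∀ x ∈ l, p x = false → f x = []) :
    (l.filter p).flatMap f = l.flatMap f := by
  induction l with
  | nil => rfl
  | cons x t ih =>
      simp only [List.filter_cons, List.flatMap_cons]
      by_cases hx : p x
      · simp [hx, ih (fun y hy => h y (List.mem_cons_of_mem _ hy))]
      · rw [if_neg hx, h x List.mem_cons_self (Bool.eq_false_iff.mpr hx),
            List.nil_append, ih (fun y hy => h y (List.mem_cons_of_mem _ hy))]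

-- KEY: the code-indexed count blocks over a covering range are a permutation of the list
theorem pv_blocks_perm : ∀ (n : Nat) (lo : Int) (l : List Char), 0 ≤ lo → lo + n ≤ 55296 →
    (∀ c ∈ l, lo ≤ (c.toNat : Int) ∧ (c.toNat : Int) < lo + n) →
    ((PySem.List.pyRange lo (lo + n) 1).flatMap
        (fun code => List.replicate (l.count (Char.ofNat code.toNat)) (Char.ofNat code.toNat))).Perm l := by
  intro n
  induction n with
  | zero =>
      intro lo l _ _ hmem
      have hl : l = [] := by
        cases l with
        | nil => rfl
        | cons c t =>
            have := hmem c List.mem_cons_self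
            omega
      subst hl
      rw [PySem.List.pyRange_one_eq_nil (by push_cast; omega)]
      simp
  | succ m ih =>
      intro lo l hlo hhi hmem
      have hlt : lo < lo + ((m+1 : Nat) : Int) := by push_cast; omega
      rw [PySem.List.pyRange_one_cons hlt, List.flatMap_cons]
      set a := Char.ofNat lo.toNat with ha
      have haNat : a.toNat = lo.toNat := by
        apply pv_chr_toNat; omega
      set l' := l.filter (fun x => !(x == a)) with hl'
      have hshift : lo + ((m+1 : Nat) : Int) = (lo + 1) + (m : Nat) := by push_cast; ring
      have hcnt : ∀ code ∈ PySem.List.pyRange (lo+1) (lo + ((m+1:Nat):Int)) 1,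
          (fun code => List.replicate (l.count (Char.ofNat code.toNat)) (Char.ofNat code.toNat)) code
          = (fun code => List.replicate (l'.count (Char.ofNat code.toNat)) (Char.ofNat code.toNat)) code := by
        intro code hc
        rw [PySem.List.mem_pyRange_one] at hc
        have hb : Char.ofNat code.toNat ≠ a := by
          intro he
          have : (Char.ofNat code.toNat).toNat = code.toNat := by
            apply pv_chr_toNat; omega
          rw [he, haNat] at this
          omega
        have hcf := List.count_filter (l := l) (p := fun x => !(x == a))
          (show (fun x => !(x == a)) (Char.ofNat code.toNat) = true by simp [hb])
        simp only [hl']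
        rw [hcf]
      rw [List.flatMap_congr hcnt]
      have hperm' : ((PySem.List.pyRange (lo+1) (lo + ((m+1:Nat):Int)) 1).flatMap
          (fun code => List.replicate (l'.count (Char.ofNat code.toNat)) (Char.ofNat code.toNat))).Perm l' := by
        rw [hshift]
        apply ih (lo+1) l' (by omega) (by omega)
        intro c hc
        have hcl : c ∈ l := List.mem_of_mem_filter hc
        have hne : c ≠ a := by
          have := List.of_mem_filter hc
          simpa using this
        have hb := hmem c hcl
        have hneq : (c.toNat : Int) ≠ lo := by
          intro he
          apply hne
          have h3 : c.toNat = a.toNat := by rw [haNat]; omega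
          exact Char.ext (UInt32.toNat_inj.mp h3)
        push_cast at hb ⊢
        omega
      have hstep : (List.replicate (l.count a) a
              ++ (PySem.List.pyRange (lo+1) (lo + ((m+1:Nat):Int)) 1).flatMap
                  (fun code => List.replicate (l'.count (Char.ofNat code.toNat)) (Char.ofNat code.toNat))).Perm
            (List.replicate (l.count a) a ++ l') := List.Perm.append_left _ hperm'
      have heq : List.replicate (l.count a) a ++ l' = l.filter (· == a) ++ l' := by
        rw [List.filter_beq]
      have hfin : (l.filter (· == a) ++ l').Perm l := List.filter_append_perm _ l
      exact hstep.trans (heq ▸ hfin)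

-- one output side: the sorted filtered singletons ARE the code-ordered count blocks
theorem pv_side (chars : List Char) (p : Char → Bool) (lo hi : Int)
    (hlo : 0 ≤ lo) (hhi : hi ≤ 55295) (hle : lo ≤ hi + 1)
    (hmem : ∀ c ∈ chars, lo ≤ (c.toNat : Int) ∧ (c.toNat : Int) < hi + 1) :
    PySem.List.sorted ((chars.filter p).map (fun c => String.ofList [c])) (fun x => x) false
    = ((PySem.List.pyRange lo (hi + 1) 1).filter (fun code => p (Char.ofNat code.toNat))).flatMap
        (fun code => List.replicate (chars.count (Char.ofNat code.toNat)) (String.ofList [Char.ofNat code.toNat])) := by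
  set q := chars.filter p with hq
  have hvalid : ∀ code ∈ PySem.List.pyRange lo (hi + 1) 1, (Char.ofNat code.toNat).toNat = code.toNat := by
    intro code hc
    rw [PySem.List.mem_pyRange_one] at hc
    apply pv_chr_toNat; omega
  -- replace chars-counts by q-counts (they agree where p holds, and q-counts vanish where not)
  have hstep1 : ((PySem.List.pyRange lo (hi + 1) 1).filter (fun code => p (Char.ofNat code.toNat))).flatMap
        (fun code => List.replicate (chars.count (Char.ofNat code.toNat)) (String.ofList [Char.ofNat code.toNat]))
      = (PySem.List.pyRange lo (hi + 1) 1).flatMap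
        (fun code => List.replicate (q.count (Char.ofNat code.toNat)) (String.ofList [Char.ofNat code.toNat])) := by
    have h1 : ∀ code ∈ (PySem.List.pyRange lo (hi + 1) 1).filter (fun code => p (Char.ofNat code.toNat)),
        (fun code => List.replicate (chars.count (Char.ofNat code.toNat)) (String.ofList [Char.ofNat code.toNat])) code
        = (fun code => List.replicate (q.count (Char.ofNat code.toNat)) (String.ofList [Char.ofNat code.toNat])) code := by
      intro code hc
      have hp := List.of_mem_filter hc
      simp only [hq, List.count_filter hp]
    rw [List.flatMap_congr h1]
    apply pv_flatMap_filter
    intro code _ hnp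
    have : q.count (Char.ofNat code.toNat) = 0 := by
      rw [hq, List.count_eq_zero]
      intro hmem'
      exact absurd (List.of_mem_filter hmem') (by simp [hnp])
    rw [this, List.replicate_zero]
  rw [hstep1]
  -- pull the singleton-string constructor out of the blocks
  have hstep2 : (PySem.List.pyRange lo (hi + 1) 1).flatMap
        (fun code => List.replicate (q.count (Char.ofNat code.toNat)) (String.ofList [Char.ofNat code.toNat]))
      = ((PySem.List.pyRange lo (hi + 1) 1).flatMap
        (fun code => List.replicate (q.count (Char.ofNat code.toNat)) (Char.ofNat code.toNat))).map
          (fun c => String.ofList [c]) := by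
    rw [List.map_flatMap]
    exact List.flatMap_congr (fun code _ => by rw [List.map_replicate])
  rw [hstep2]
  apply PySem.List.sorted_id_eq_of_perm_of_pairwise
  · apply List.Perm.map
    have h := pv_blocks_perm ((hi + 1 - lo).toNat) lo q (by omega) (by omega)
      (fun c hc => by
        have := hmem c (List.mem_of_mem_filter hc)
        omega)
    have harg : lo + (((hi + 1 - lo).toNat : Nat) : Int) = hi + 1 := by omega
    rw [harg] at h
    exact h
  · rw [List.pairwise_map]
    have hpw : ((PySem.List.pyRange lo (hi + 1) 1).flatMap
        (fun code => List.replicate (q.count (Char.ofNat code.toNat)) (Char.ofNat code.toNat))).Pairwise (· ≤ ·) := by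
      rw [List.pairwise_flatMap]
      constructor
      · intro code _
        exact List.pairwise_replicate_of_refl
      · apply List.Pairwise.imp_of_mem (l := PySem.List.pyRange lo (hi+1) 1)
          (R := (· < ·)) ?_ (PySem.List.pairwise_lt_pyRange_one lo (hi+1))
        intro c1 c2 h1 h2 hlt x hx y hy
        rw [List.eq_of_mem_replicate hx, List.eq_of_mem_replicate hy]
        rw [PySem.List.mem_pyRange_one] at h1 h2
        have e1 := pv_chr_toNat c1.toNat (by omega)
        have e2 := pv_chr_toNat c2.toNat (by omega)
        have hle12 : (Char.ofNat c1.toNat).toNat ≤ (Char.ofNat c2.toNat).toNat := by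
          rw [e1, e2]; omega
        exact Char.le_def.mpr hle12
    exact hpw.imp (fun h => (pv_sg_le _ _).mpr h)

-- ===== VERDICT =====
theorem parse_raw_data_spec : Claim_equal_parse_raw_data := by
  intro entry hdom
  unfold Spec_parse_raw_data parse_raw_data parse_raw_data_alt
  rcases hcase : entry.toList with _ | ⟨c0, t0⟩
  · simp [PySem.List.sorted]
  · rw [← hcase]
    have hne : entry.toList ≠ [] := by rw [hcase]; exact List.cons_ne_nil _ _
    -- characters admitted by the domain have codes ≤ 126
    have hdomc : ∀ c ∈ entry.toList, c.toNat ≤ 126 := by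
      intro c hc
      have hd : pvDomChar c = true := by
        unfold Dom_parse_raw_data pvDomStr at hdom
        rw [List.all_eq_true] at hdom
        exact hdom c hc
      unfold pvDomChar at hd
      simp at hd
      omega
    rw [if_neg (by simp [hne])]
    simp only []
    rcases hmin : PySem.List.min? (entry.toList.map fun ch => ((ch.toNat : Nat) : Int)) (fun x => x)
      with _ | lo
    · exfalso
      rw [PySem.List.min?_eq_none_iff] at hmin
      simp [hne] at hmin
    rcases hmax : PySem.List.max? (entry.toList.map fun ch => ((ch.toNat : Nat) : Int)) (fun x => x)
      with _ | hi
    · exfalso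
      rw [PySem.List.max?_eq_none_iff] at hmax
      simp [hne] at hmax
    simp only [hmin, hmax]
    -- bounds delivered by min / max and the domain
    have hloMin := PySem.List.min?_isMin hmin
    have hhiMax := PySem.List.max?_isMax hmax
    obtain ⟨cl, hcl, hclo⟩ := List.mem_map.mp (PySem.List.min?_mem hmin)
    obtain ⟨cm, hcm, hcmi⟩ := List.mem_map.mp (PySem.List.max?_mem hmax)
    have hlo : 0 ≤ lo := by rw [← hclo]; positivity
    have hhi : hi ≤ 55295 := by
      have := hdomc cm hcm
      omega
    have hmem : ∀ c ∈ entry.toList, lo ≤ (c.toNat : Int) ∧ (c.toNat : Int) < hi + 1 := by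
      intro c hc
      have h1 := hloMin _ (List.mem_map_of_mem hc)
      have h2 := hhiMax _ (List.mem_map_of_mem hc)
      simp only [] at h1 h2
      exact ⟨h1, by omega⟩
    have hle : lo ≤ hi + 1 := by
      have := hmem c0 (hcase ▸ List.mem_cons_self)
      omega
    -- both folds become filtered flatMaps
    rw [pv_foldl_route, pv_foldl_route]
    simp only [List.nil_append,
      PySem.Dict.foldl_insert_getD_add_one_eq_counter, PySem.Dict.getD_counter,
      PySem.List.pyRepeat_singleton, Int.toNat_natCast, ← List.map_eq_flatMap]
    rw [Prod.mk.injEq]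
    constructor
    · exact pv_side entry.toList pvIsOp lo hi hlo hhi hle hmem
    · exact pv_side entry.toList (fun c => !pvIsOp c) lo hi hlo hhi hle hmem
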